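-- pv_equiv track=rewrite | github.com/RangelGasharov/Python_Basics | algorithms/edabit_sock_pairs.py | sock_pairs
-- ===== SOURCE A (Python) =====
-- def sock_pairs(letters_string):
--     letters_string_array = list(letters_string)
--     letters_string_array.sort()
--     index_last_pair = -1
--     amount_of_pairs = 0
--     for i in range(len(letters_string_array) - 1):
--         if letters_string_array[i] == letters_string_array[i + 1] and i != index_last_pair:
--             amount_of_pairs += 1
--             index_last_pair = i + 1
--     return amount_of_pairs
-- ===== SOURCE B (Python) =====
-- def sock_pairs(letters_string):
--     unpaired = set()
--     amount_of_pairs = 0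
--     for c in letters_string:
--         if c in unpaired:
--             unpaired.remove(c)
--             amount_of_pairs += 1
--         else:
--             unpaired.add(c)
--     return amount_of_pairs
-- ===== Notes on version B (the rewrite author's own statement) =====
-- stated objective: faster
-- what changed: Replaced A's sort followed by an adjacent-index scan with a last-pair sentinel by a single online pass that toggles each character's membership in a set of currently-unpaired characters, counting a pair on each removal.
import Mathlib
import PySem

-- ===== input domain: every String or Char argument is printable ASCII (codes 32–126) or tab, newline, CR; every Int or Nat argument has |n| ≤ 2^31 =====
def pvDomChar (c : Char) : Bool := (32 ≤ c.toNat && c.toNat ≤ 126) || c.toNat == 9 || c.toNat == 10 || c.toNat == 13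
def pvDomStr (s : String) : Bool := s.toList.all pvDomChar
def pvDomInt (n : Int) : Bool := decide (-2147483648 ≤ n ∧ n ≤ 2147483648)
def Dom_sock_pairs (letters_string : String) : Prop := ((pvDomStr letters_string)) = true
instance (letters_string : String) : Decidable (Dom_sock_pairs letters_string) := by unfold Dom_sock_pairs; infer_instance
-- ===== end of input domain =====

-- B drops A's sort + adjacent scan for a single pass toggling a set of unpaired characters (objective: faster, measured).

-- ===== PORT A =====
-- loop body of A: state (index_last_pair, amount_of_pairs); indices stay in range, so pyGetD's default is never used
def stepA (arr : List Char) (st : Int × Int) (i : Int) : Int × Int :=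
  if PySem.List.pyGetD arr i ' ' = PySem.List.pyGetD arr (i + 1) ' ' ∧ i ≠ st.1
  then (i + 1, st.2 + 1) else st

def sock_pairs (letters_string : String) : Int :=
  let arr := PySem.List.sorted letters_string.toList (fun x => x) false
  ((PySem.List.pyRange 0 ((arr.length : Int) - 1) 1).foldl (stepA arr) (-1, 0)).2

-- ===== PORT B =====
-- loop body of B: state (set of currently-unpaired characters, amount_of_pairs)
def stepB (st : PySem.Set Char × Int) (c : Char) : PySem.Set Char × Int :=
  if PySem.Set.contains st.1 c
  then (PySem.Set.discard st.1 c, st.2 + 1)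
  else (PySem.Set.add st.1 c, st.2)

def sock_pairs_alt (letters_string : String) : Int :=
  (letters_string.toList.foldl stepB (PySem.Set.empty, 0)).2

-- ===== PRECONDITION & SPEC =====
def Spec_sock_pairs (letters_string : String) (out : Int) : Prop := out = sock_pairs_alt letters_string
instance (letters_string : String) (out : Int) : Decidable (Spec_sock_pairs letters_string out) := by unfold Spec_sock_pairs; infer_instance

-- ===== CLAIM (what is proved, stated in full; the proofs are below) =====
def Claim_equal_sock_pairs : Prop := ∀ (letters_string : String), Dom_sock_pairs letters_string → Spec_sock_pairs letters_string (sock_pairs letters_string)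

-- ===== LEMMAS AND PROOFS =====

-- number of adjacent equal pairs in a sorted list, skipping over a counted pair
def pairsF : List Char → Nat
  | [] => 0
  | [_] => 0
  | a :: b :: t => if a = b then pairsF t + 1 else pairsF (b :: t)

theorem pairsF_short (l : List Char) (h : l.length ≤ 1) : pairsF l = 0 := by
  match l with
  | [] => rfl
  | [_] => rfl
  | _ :: _ :: _ => simp at h

-- A's indexed loop with the last-pair sentinel computes pairsF of the suffix
theorem loopA_eq (arr : List Char) (k : Nat) :
    ∀ (i : Nat) (ilp amt : Int), arr.length - i ≤ k → ilp ≤ (i : Int) →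
    ((PySem.List.pyRange (i : Int) ((arr.length : Int) - 1) 1).foldl (stepA arr) (ilp, amt)).2
      = amt + (pairsF (arr.drop (if ilp = (i : Int) then i + 1 else i)) : Int) := by
  induction k with
  | zero =>
    intro i ilp amt hk hle
    have hlen : arr.length ≤ i := by omega
    rw [PySem.List.pyRange_one_eq_nil (by omega)]
    have h1 : pairsF (arr.drop (i + 1)) = 0 := pairsF_short _ (by simp; omega)
    have h2 : pairsF (arr.drop i) = 0 := pairsF_short _ (by simp; omega)
    split <;> simp [h1, h2]
  | succ k ih =>
    intro i ilp amt hk hle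
    by_cases hend : arr.length ≤ i + 1
    · rw [PySem.List.pyRange_one_eq_nil (by omega)]
      have h1 : pairsF (arr.drop (i + 1)) = 0 := pairsF_short _ (by simp; omega)
      have h2 : pairsF (arr.drop i) = 0 := pairsF_short _ (by simp; omega)
      split <;> simp [h1, h2]
    · have hi : i < arr.length := by omega
      have hi1 : i + 1 < arr.length := by omega
      rw [PySem.List.pyRange_one_cons (by omega)]
      simp only [List.foldl_cons]
      have hg1 : PySem.List.pyGetD arr (i : Int) ' ' = arr[i] := by
        rw [PySem.List.pyGetD_natCast]; exact List.getD_eq_getElem _ _ hi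
      have hg2 : PySem.List.pyGetD arr ((i : Int) + 1) ' ' = arr[i + 1] := by
        have : ((i : Int) + 1) = ((i + 1 : Nat) : Int) := by push_cast; ring
        rw [this, PySem.List.pyGetD_natCast]; exact List.getD_eq_getElem _ _ hi1
      have hdrop : arr.drop i = arr[i] :: arr[i + 1] :: arr.drop (i + 2) := by
        rw [List.drop_eq_getElem_cons hi, List.drop_eq_getElem_cons hi1]
      by_cases hilp : ilp = (i : Int)
      · have hstep : stepA arr (ilp, amt) (i : Int) = (ilp, amt) := by
          simp [stepA, hilp]
        rw [hstep]
        have := ih (i + 1) ilp amt (by omega) (by push_cast; omega)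
        rw [show ((i : Int) + 1) = ((i + 1 : Nat) : Int) by push_cast; ring]
        rw [this]
        have hne : ilp ≠ ((i + 1 : Nat) : Int) := by push_cast; omega
        simp [hilp]
      · by_cases hab : arr[i] = arr[i + 1]
        · have hilp' : ¬(i : Int) = ilp := fun h => hilp h.symm
          have hstep : stepA arr (ilp, amt) (i : Int) = ((i : Int) + 1, amt + 1) := by
            simp [stepA, hg1, hg2, hab, hilp']
          rw [hstep]
          rw [show ((i : Int) + 1) = ((i + 1 : Nat) : Int) by push_cast; ring]
          rw [ih (i + 1) ((i + 1 : Nat) : Int) (amt + 1) (by omega) (by omega)]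
          simp only [if_neg hilp]
          rw [hdrop]
          simp only [pairsF, if_pos hab]
          push_cast; ring
        · have hstep : stepA arr (ilp, amt) (i : Int) = (ilp, amt) := by
            simp [stepA, hg1, hg2, hab]
          rw [hstep]
          rw [show ((i : Int) + 1) = ((i + 1 : Nat) : Int) by push_cast; ring]
          rw [ih (i + 1) ilp amt (by omega) (by push_cast; omega)]
          have hne : ilp ≠ ((i + 1 : Nat) : Int) := by push_cast; omega
          simp only [if_neg hne, if_neg hilp]
          rw [hdrop]
          have : arr.drop (i + 1) = arr[i + 1] :: arr.drop (i + 2) := List.drop_eq_getElem_cons hi1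
          rw [this]
          simp [pairsF, hab]

-- on a sorted list, pairsF is the sum over characters of ⌊count/2⌋
theorem pairsF_sum : ∀ (l : List Char), l.Pairwise (· ≤ ·) →
    ∀ F : Finset Char, (∀ c ∈ l, c ∈ F) →
    pairsF l = ∑ c ∈ F, l.count c / 2 := by
  intro l
  induction l using pairsF.induct with
  | case1 =>
    intro _ F _; simp [pairsF]
  | case2 a =>
    intro _ F _
    simp only [pairsF]
    symm; apply Finset.sum_eq_zero
    intro c _
    have h : List.count c [a] ≤ 1 := by
      calc List.count c [a] ≤ [a].length := List.count_le_length
      _ = 1 := rfl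
    omega
  | case3 a t ih =>
    intro hp F hF
    have hpt : t.Pairwise (· ≤ ·) := (List.pairwise_cons.mp (List.pairwise_cons.mp hp).2).2
    have ha : a ∈ F := hF a (by simp)
    have key : ∀ c ∈ F, (a :: a :: t).count c / 2 = t.count c / 2 + (if c = a then 1 else 0) := by
      intro c _
      by_cases hca : c = a
      · subst hca; simp; omega
      · have hac : ¬a = c := fun h => hca h.symm
        simp [hac, hca]
    have hsum : ∑ c ∈ F, (a :: a :: t).count c / 2
        = (∑ c ∈ F, t.count c / 2) + (∑ c ∈ F, if c = a then 1 else 0) := by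
      rw [Finset.sum_congr rfl key, Finset.sum_add_distrib]
    rw [hsum, Finset.sum_ite_eq' F a (fun _ => 1), if_pos ha,
        ← ih hpt F (fun c hc => hF c (by simp [hc]))]
    simp [pairsF]
  | case4 a b t hab ih =>
    intro hp F hF
    have hp' : (b :: t).Pairwise (· ≤ ·) := (List.pairwise_cons.mp hp).2
    have hle : ∀ x ∈ b :: t, a ≤ x := (List.pairwise_cons.mp hp).1
    have hnotin : a ∉ b :: t := by
      intro hmem
      rcases List.mem_cons.mp hmem with h | h
      · exact hab h
      · have h1 : b ≤ a := by
          have := (List.pairwise_cons.mp hp').1 a h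
          simpa using this
        have h2 : a ≤ b := hle b (by simp)
        exact hab (le_antisymm h2 h1)
    have hcount : (b :: t).count a = 0 := List.count_eq_zero.mpr hnotin
    have key : ∀ c ∈ F, (a :: b :: t).count c / 2 = (b :: t).count c / 2 := by
      intro c _
      by_cases hca : c = a
      · subst hca
        have hbc : ¬b = c := fun h => hab h.symm
        have hct : List.count c t = 0 := by
          simp [hbc] at hcount; exact hcount
        simp [hbc, hct]
      · have hac : ¬a = c := fun h => hca h.symm
        simp [List.count_cons, hac]
    simp only [pairsF, if_neg hab]
    rw [ih hp' F (fun c hc => hF c (by simp [List.mem_cons.mp hc]))]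
    exact (Finset.sum_congr rfl key).symm

-- B's toggle pass: the counter equals the sum of ⌊(count + initial parity)/2⌋
theorem loopB_eq : ∀ (l : List Char) (s : PySem.Set Char) (k : Int) (F : Finset Char),
    (∀ c ∈ l, c ∈ F) → s.Nodup →
    (l.foldl stepB (s, k)).2
      = k + ((∑ c ∈ F, (l.count c + (if c ∈ s then 1 else 0)) / 2 : Nat) : Int) := by
  intro l
  induction l with
  | nil =>
    intro s k F _ _
    have : (∑ c ∈ F, (([] : List Char).count c + (if c ∈ s then 1 else 0)) / 2) = 0 := by
      apply Finset.sum_eq_zero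
      intro c _
      simp only [List.count_nil]
      split <;> simp
    rw [List.foldl_nil, this]
    simp
  | cons a t ih =>
    intro s k F hF hnd
    have haF : a ∈ F := hF a (by simp)
    simp only [List.foldl_cons]
    by_cases hmem : a ∈ s
    · have hc : PySem.Set.contains s a = true := (PySem.Set.contains_iff s a).mpr hmem
      have hstep : stepB (s, k) a = (PySem.Set.discard s a, k + 1) := by
        simp [stepB, hmem]
      rw [hstep]
      rw [ih (PySem.Set.discard s a) (k + 1) F (fun c hc' => hF c (by simp [hc'])) (PySem.Set.nodup_discard s a hnd)]
      have key : ∀ c ∈ F, ((a :: t).count c + (if c ∈ s then 1 else 0)) / 2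
          = (t.count c + (if c ∈ PySem.Set.discard s a then 1 else 0)) / 2 + (if c = a then 1 else 0) := by
        intro c _
        by_cases hca : c = a
        · subst hca
          have h1 : c ∉ PySem.Set.discard s c := by simp [PySem.Set.mem_discard]
          simp [hmem, h1]
          omega
        · have hac : ¬a = c := fun h => hca h.symm
          have h1 : c ∈ PySem.Set.discard s a ↔ c ∈ s := by simp [PySem.Set.mem_discard, hca]
          simp [hac, hca, h1]
      have hsum : (∑ c ∈ F, ((a :: t).count c + (if c ∈ s then 1 else 0)) / 2)
          = (∑ c ∈ F, (t.count c + (if c ∈ PySem.Set.discard s a then 1 else 0)) / 2)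
            + (∑ c ∈ F, if c = a then 1 else 0) := by
        rw [Finset.sum_congr rfl key, Finset.sum_add_distrib]
      rw [hsum, Finset.sum_ite_eq' F a (fun _ => 1), if_pos haF]
      push_cast; ring
    · have hc : PySem.Set.contains s a = false := by
        by_contra h
        exact hmem ((PySem.Set.contains_iff s a).mp (by simpa using h))
      have hstep : stepB (s, k) a = (PySem.Set.add s a, k) := by
        simp [stepB, hmem]
      rw [hstep]
      rw [ih (PySem.Set.add s a) k F (fun c hc' => hF c (by simp [hc'])) (PySem.Set.nodup_add s a hnd)]
      have key : ∀ c ∈ F, ((a :: t).count c + (if c ∈ s then 1 else 0)) / 2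
          = (t.count c + (if c ∈ PySem.Set.add s a then 1 else 0)) / 2 := by
        intro c _
        by_cases hca : c = a
        · subst hca
          have h1 : c ∈ PySem.Set.add s c := by simp [PySem.Set.mem_add]
          simp [hmem]
        · have hac : ¬a = c := fun h => hca h.symm
          have h1 : c ∈ PySem.Set.add s a ↔ c ∈ s := by
            simp [PySem.Set.mem_add, hca]
          simp [hac, h1]
      rw [Finset.sum_congr rfl key]

-- ===== VERDICT (by name: the statement is the Claim_ definition above) =====
theorem sock_pairs_spec : Claim_equal_sock_pairs := by
  intro s _
  unfold Spec_sock_pairs sock_pairs sock_pairs_alt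
  set l := s.toList with hl
  set arr := PySem.List.sorted l (fun x => x) false with harr
  have hperm : arr.Perm l := PySem.List.sorted_perm l (fun x => x) false
  -- A side
  have hA := loopA_eq arr arr.length 0 (-1) 0 (by omega) (by simp)
  have hA' : ((PySem.List.pyRange 0 ((arr.length : Int) - 1) 1).foldl (stepA arr) (-1, 0)).2
      = (pairsF arr : Int) := by
    simpa using hA
  rw [hA']
  -- B side
  have hB := loopB_eq l PySem.Set.empty 0 l.toFinset
    (fun c hc => List.mem_toFinset.mpr hc) (by simp [PySem.Set.empty])
  have hB' : (l.foldl stepB (PySem.Set.empty, 0)).2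
      = ((∑ c ∈ l.toFinset, l.count c / 2 : Nat) : Int) := by
    rw [hB]
    have : ∀ c ∈ l.toFinset, (l.count c + (if c ∈ PySem.Set.empty then 1 else 0)) / 2 = l.count c / 2 := by
      intro c _
      have : c ∉ PySem.Set.empty := by simp [PySem.Set.empty]
      simp
    rw [Finset.sum_congr rfl this]
    ring
  rw [hB']
  -- connect
  have hpw : arr.Pairwise (· ≤ ·) := by
    have := PySem.List.sorted_pairwise l (fun x => x)
    simpa using this
  have hF : ∀ c ∈ arr, c ∈ l.toFinset := fun c hc =>
    List.mem_toFinset.mpr (hperm.mem_iff.mp hc)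
  have := pairsF_sum arr hpw l.toFinset hF
  rw [this]
  congr 1
  apply Finset.sum_congr rfl
  intro c _
  rw [hperm.count_eq]
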